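-- pv_equiv track=rewrite | github.com/FZ1977/Python | sort_by_vocals.py | Vocali
-- ===== SOURCE A (Python) =====
-- def Vocali(a):
--     v = ('a','e','i','o','u')
--     V = ('A','E','I','O','U')
--     vocali = []
--
--     for i in a:
--         if(i in v or i in V):
--             vocali.append(i)
--
--     for j in range(len(vocali)-1):
--         for z in range(j+1,len(vocali)):
--             if(vocali[j] > vocali[z]):
--                 temp = vocali[j]
--                 vocali[j] = vocali[z]
--                 vocali[z] = temp
--     return vocali
-- ===== SOURCE B (Python) =====
-- def Vocali(a):
--     vowels = "AEIOUaeiou"          # all vowels in ASCII (code-point) order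
--     counts = {}
--     for ch in a:                   # one pass: count each vowel occurrence
--         if ch in vowels:
--             counts[ch] = counts.get(ch, 0) + 1
--     out = []
--     for v in vowels:               # emit buckets in ASCII order
--         out += [v] * counts.get(v, 0)
--     return out
-- ===== Notes on version B (the rewrite author's own statement) =====
-- stated objective: faster
-- what changed: Replaced A's filter-then-quadratic-pairwise-swap sort with a single counting pass over the string followed by emitting the ten vowel buckets in ASCII order (counting sort).
import Mathlib
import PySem

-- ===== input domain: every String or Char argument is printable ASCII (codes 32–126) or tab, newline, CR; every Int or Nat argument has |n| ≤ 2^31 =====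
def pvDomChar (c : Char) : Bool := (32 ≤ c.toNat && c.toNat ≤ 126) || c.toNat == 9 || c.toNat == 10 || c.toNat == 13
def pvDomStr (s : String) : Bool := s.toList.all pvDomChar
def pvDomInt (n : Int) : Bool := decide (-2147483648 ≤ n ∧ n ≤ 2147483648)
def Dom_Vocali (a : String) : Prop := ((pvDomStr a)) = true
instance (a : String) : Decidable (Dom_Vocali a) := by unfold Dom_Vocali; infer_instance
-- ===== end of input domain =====

-- B replaces A's quadratic pairwise-swap sort by one counting pass over the string followed by
-- emitting the ten vowel buckets in ASCII order (objective: faster).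
-- Python's elements are 1-character strings; both ports model them as Char and convert with
-- Char.toString at return — comparison of 1-char Python strings is exactly Char code-point order.

-- ===== PORT A =====
-- body of the inner 'for z' loop: if vocali[j] > vocali[z]: swap (temp is read before assignment)
def VocA_step (j : Int) (l : List Char) (z : Int) : List Char :=
  if PySem.List.pyGetD l z ' ' < PySem.List.pyGetD l j ' ' then
    let temp := PySem.List.pyGetD l j ' '
    let l1 := PySem.List.pySetD l j (PySem.List.pyGetD l z ' ')
    PySem.List.pySetD l1 z temp
  else l

def Vocali (a : String) : List String :=
  let vocali : List Char :=
    a.toList.foldl (fun voc i =>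
      if i ∈ ['a','e','i','o','u'] ∨ i ∈ ['A','E','I','O','U'] then voc ++ [i] else voc) []
  let vocali :=
    (PySem.List.pyRange 0 ((vocali.length : Int) - 1) 1).foldl
      (fun l j => (PySem.List.pyRange (j + 1) (l.length : Int) 1).foldl (VocA_step j) l) vocali
  vocali.map Char.toString

-- ===== PORT B =====
-- the Python string constant "AEIOUaeiou", as the chars it iterates as
def VocB_vowels : List Char := ['A','E','I','O','U','a','e','i','o','u']

def Vocali_alt (a : String) : List String :=
  let counts : PySem.Dict Char Int :=
    a.toList.foldl (fun d ch =>
      if VocB_vowels.contains ch then d.insert ch (d.getD ch 0 + 1) else d) PySem.Dict.empty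
  let out : List Char :=
    VocB_vowels.foldl (fun out v => out ++ List.replicate (counts.getD v 0).toNat v) []
  out.map Char.toString

-- ===== PRECONDITION & SPEC =====
def Spec_Vocali (a : String) (out : List String) : Prop := out = Vocali_alt a
instance (a : String) (out : List String) : Decidable (Spec_Vocali a out) := by unfold Spec_Vocali; infer_instance

-- ===== CLAIM (what is proved, stated in full; the proofs are below) =====
def Claim_equal_Vocali : Prop := ∀ (a : String), Dom_Vocali a → Spec_Vocali a (Vocali a)

-- ===== LEMMAS AND PROOFS =====

-- selection of the minimum, as performed by A's inner loop on the suffix after position j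
def selMin (x : Char) : List Char → Char × List Char
  | [] => (x, [])
  | y :: ys =>
    if y < x then ((selMin y ys).1, x :: (selMin y ys).2)
    else ((selMin x ys).1, y :: (selMin x ys).2)

theorem selMin_length (x : Char) (l : List Char) : (selMin x l).2.length = l.length := by
  induction l generalizing x with
  | nil => rfl
  | cons y ys ih => simp only [selMin]; split <;> simp [ih]

-- the selection sort A's nested loops implement
def selSort : List Char → List Char
  | [] => []
  | x :: rest => (selMin x rest).1 :: selSort (selMin x rest).2
termination_by l => l.length
decreasing_by simp [selMin_length]

-- list index/update helpers (index given as any n provably equal to the prefix length)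
theorem getD_append_eq (pre : List Char) (x : Char) (s : List Char) (d : Char)
    {n : Nat} (h : n = pre.length) : (pre ++ x :: s).getD n d = x := by
  subst h
  induction pre with
  | nil => rfl
  | cons p ps ih => simpa using ih

theorem set_append_eq (pre : List Char) (x v : Char) (s : List Char)
    {n : Nat} (h : n = pre.length) : (pre ++ x :: s).set n v = pre ++ v :: s := by
  subst h
  induction pre with
  | nil => rfl
  | cons p ps ih => simpa using ih

-- A's inner 'for z' loop selects the minimum of the suffix into position j,
-- shuffling the rest as selMin records
theorem inner_aux (todo : List Char) : ∀ (pre done : List Char) (x : Char) (j lo hi : Int),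
    j = pre.length → lo = (pre.length : Int) + done.length + 1 →
    hi = (pre.length : Int) + 1 + done.length + todo.length →
    (PySem.List.pyRange lo hi 1).foldl (VocA_step j) (pre ++ x :: (done ++ todo))
    = pre ++ (selMin x todo).1 :: (done ++ (selMin x todo).2) := by
  induction todo with
  | nil =>
    intro pre done x j lo hi hj hlo hhi
    rw [PySem.List.pyRange_one_eq_nil (by simp only [List.length_nil] at hhi; omega)]
    simp [selMin]
  | cons y ys ih =>
    intro pre done x j lo hi hj hlo hhi
    have hyl : ((y :: ys).length : Int) = (ys.length : Int) + 1 := by simp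
    rw [PySem.List.pyRange_one_cons (by omega)]
    simp only [List.foldl_cons]
    have hlist : pre ++ x :: (done ++ y :: ys) = (pre ++ x :: done) ++ y :: ys := by simp
    have hgj : PySem.List.pyGetD (pre ++ x :: (done ++ y :: ys)) j ' ' = x := by
      rw [hj, PySem.List.pyGetD_natCast, getD_append_eq pre x _ _ rfl]
    have hloN : lo = (((pre ++ x :: done).length : Nat) : Int) := by simp; omega
    have hgz : PySem.List.pyGetD (pre ++ x :: (done ++ y :: ys)) lo ' ' = y := by
      rw [hloN, PySem.List.pyGetD_natCast, hlist, getD_append_eq _ y _ _ rfl]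
    by_cases hlt : y < x
    · have hstep : VocA_step j (pre ++ x :: (done ++ y :: ys)) lo
          = pre ++ y :: ((done ++ [x]) ++ ys) := by
        unfold VocA_step
        rw [hgj, hgz, if_pos hlt, hj, PySem.List.pySetD_natCast, set_append_eq pre x y _ rfl,
            hloN, PySem.List.pySetD_natCast,
            show pre ++ y :: (done ++ y :: ys) = (pre ++ y :: done) ++ y :: ys by simp,
            set_append_eq _ y x _ (by simp)]
        simp
      rw [hstep, ih pre (done ++ [x]) y j (lo + 1) hi hj (by simp; omega) (by simp at hhi ⊢; omega)]
      simp [selMin, hlt]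
    · have hstep : VocA_step j (pre ++ x :: (done ++ y :: ys)) lo
          = pre ++ x :: (done ++ y :: ys) := by
        unfold VocA_step
        rw [hgj, hgz, if_neg hlt]
      rw [hstep, show pre ++ x :: (done ++ y :: ys) = pre ++ x :: ((done ++ [y]) ++ ys) by simp,
          ih pre (done ++ [y]) x j (lo + 1) hi hj (by simp; omega) (by simp at hhi ⊢; omega)]
      simp [selMin, hlt]

-- A's outer 'for j' loop is selection sort on the unsorted suffix
theorem outer_aux (n : Nat) : ∀ (rest pre : List Char) (lo hi : Int), rest.length = n →
    lo = (pre.length : Int) → hi = (pre.length : Int) + rest.length - 1 →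
    (PySem.List.pyRange lo hi 1).foldl
      (fun l j => (PySem.List.pyRange (j + 1) (l.length : Int) 1).foldl (VocA_step j) l)
      (pre ++ rest)
    = pre ++ selSort rest := by
  induction n with
  | zero =>
    intro rest pre lo hi h hlo hhi
    rw [List.length_eq_zero_iff] at h; subst h
    rw [PySem.List.pyRange_one_eq_nil (by simp only [List.length_nil] at hhi; omega)]
    simp [selSort]
  | succ m ih =>
    intro rest pre lo hi h hlo hhi
    match rest with
    | x :: rest' =>
      have hsel : selSort (x :: rest') = (selMin x rest').1 :: selSort (selMin x rest').2 := by
        rw [selSort]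
      match rest' with
      | [] =>
        rw [PySem.List.pyRange_one_eq_nil (by simp at hhi; omega)]
        simp [hsel, selSort, selMin]
      | z :: zs =>
        have hlen1 : ((z :: zs).length : Int) = (zs.length : Int) + 1 := by simp
        have hlen2 : ((x :: z :: zs).length : Int) = (zs.length : Int) + 2 := by simp; omega
        rw [PySem.List.pyRange_one_cons (by omega)]
        simp only [List.foldl_cons]
        have hin := inner_aux (z :: zs) pre [] x lo (lo + 1) ((pre ++ x :: z :: zs).length : Int)
              hlo (by simp; omega) (by simp; omega)
        simp only [List.nil_append] at hin
        rw [hin]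
        have hmt := selMin_length x (z :: zs)
        rw [show pre ++ (selMin x (z :: zs)).1 :: (selMin x (z :: zs)).2
              = (pre ++ [(selMin x (z :: zs)).1]) ++ (selMin x (z :: zs)).2 by simp,
            ih (selMin x (z :: zs)).2 (pre ++ [(selMin x (z :: zs)).1]) (lo + 1) hi
              (by simp at hmt ⊢; omega) (by simp; omega)
              (by rw [hmt]; simp at hhi ⊢; omega)]
        simp [hsel]

-- selMin facts
theorem selMin_fst_le (x : Char) (l : List Char) : (selMin x l).1 ≤ x := by
  induction l generalizing x with
  | nil => simp [selMin]
  | cons y ys ih =>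
    simp only [selMin]
    split
    · exact le_of_lt (lt_of_le_of_lt (ih y) (by assumption))
    · exact ih x

theorem selMin_fst_le_mem (x : Char) (l : List Char) :
    ∀ z ∈ (selMin x l).2, (selMin x l).1 ≤ z := by
  induction l generalizing x with
  | nil => simp [selMin]
  | cons y ys ih =>
    intro z hz
    by_cases hlt : y < x
    · simp only [selMin, if_pos hlt] at hz ⊢
      rcases List.mem_cons.mp hz with rfl | hz
      · exact le_of_lt (lt_of_le_of_lt (selMin_fst_le y ys) hlt)
      · exact ih y z hz
    · simp only [selMin, if_neg hlt] at hz ⊢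
      rcases List.mem_cons.mp hz with rfl | hz
      · exact le_trans (selMin_fst_le x ys) (le_of_not_gt hlt)
      · exact ih x z hz

theorem selMin_perm (x : Char) (l : List Char) :
    ((selMin x l).1 :: (selMin x l).2).Perm (x :: l) := by
  induction l generalizing x with
  | nil => simp [selMin]
  | cons y ys ih =>
    by_cases hlt : y < x
    · simp only [selMin, if_pos hlt]
      exact (List.Perm.swap x _ _).trans ((ih y).cons x)
    · simp only [selMin, if_neg hlt]
      exact ((List.Perm.swap y _ _).trans ((ih x).cons y)).trans (List.Perm.swap x y ys)

theorem selSort_perm (l : List Char) : (selSort l).Perm l := by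
  induction hn : l.length generalizing l with
  | zero => rw [List.length_eq_zero_iff] at hn; subst hn; simp [selSort]
  | succ m ih =>
    match l with
    | x :: rest =>
      rw [show selSort (x :: rest) = (selMin x rest).1 :: selSort (selMin x rest).2 from by
        rw [selSort]]
      exact ((ih _ (by rw [selMin_length]; simpa using hn)).cons _).trans (selMin_perm x rest)

theorem selSort_sorted (l : List Char) : (selSort l).Pairwise (· ≤ ·) := by
  induction hn : l.length generalizing l with
  | zero => rw [List.length_eq_zero_iff] at hn; subst hn; simp [selSort]
  | succ m ih =>
    match l with
    | x :: rest =>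
      rw [show selSort (x :: rest) = (selMin x rest).1 :: selSort (selMin x rest).2 from by
        rw [selSort]]
      refine List.pairwise_cons.mpr ⟨?_, ih _ (by rw [selMin_length]; simpa using hn)⟩
      intro b hb
      exact selMin_fst_le_mem x rest b
        ((selSort_perm (selMin x rest).2).mem_iff.mp hb)

-- counting-sort emission: flatMap of replicated buckets
theorem flatMap_congr_mem {α β : Type} (l : List α) (f g : α → List β)
    (h : ∀ x ∈ l, f x = g x) : l.flatMap f = l.flatMap g := by
  induction l with
  | nil => rfl
  | cons x xs ih =>
    simp only [List.flatMap_cons, h x (List.mem_cons_self), ih (fun y hy => h y (List.mem_cons_of_mem x hy))]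

theorem flatMap_replicate_perm (vl : List Char) (hnd : vl.Nodup) :
    ∀ l : List Char, (∀ x ∈ l, x ∈ vl) →
    (vl.flatMap fun v => List.replicate (l.count v) v).Perm l := by
  induction vl with
  | nil =>
    intro l hl
    match l with
    | [] => simp
    | y :: _ => exact absurd (hl y List.mem_cons_self) (by simp)
  | cons v vl' ih =>
    intro l hl
    simp only [List.flatMap_cons]
    have hrep : List.filter (· == v) l = List.replicate (l.count v) v := List.filter_beq v
    have hcongr : (vl'.flatMap fun w => List.replicate (l.count w) w)
        = vl'.flatMap fun w => List.replicate ((l.filter (fun x => !(x == v))).count w) w := by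
      refine flatMap_congr_mem _ _ _ (fun w hw => ?_)
      have hne : w ≠ v := fun e => (List.nodup_cons.mp hnd).1 (e ▸ hw)
      rw [List.count_filter (by simp [hne])]
    rw [hcongr]
    have hsub : ∀ x ∈ l.filter (fun x => !(x == v)), x ∈ vl' := by
      intro x hx
      have hm := List.mem_of_mem_filter hx
      have hp := List.of_mem_filter hx
      simp only [Bool.not_eq_eq_eq_not, Bool.not_true, beq_eq_false_iff_ne, ne_eq] at hp
      rcases List.mem_cons.mp (hl x hm) with rfl | h
      · exact absurd rfl hp
      · exact h
    refine List.Perm.trans ?_ (List.filter_append_perm (· == v) l)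
    rw [hrep]
    exact (ih (List.nodup_cons.mp hnd).2 _ hsub).append_left _

theorem flatMap_replicate_sorted (vl : List Char) (h : vl.Pairwise (· < ·)) (cnt : Char → Nat) :
    (vl.flatMap fun v => List.replicate (cnt v) v).Pairwise (· ≤ ·) := by
  induction vl with
  | nil => simp
  | cons v vl' ih =>
    simp only [List.flatMap_cons]
    rw [List.pairwise_append]
    refine ⟨by simp [List.pairwise_replicate], ih (List.pairwise_cons.mp h).2, ?_⟩
    intro a ha b hb
    rw [List.eq_of_mem_replicate ha]
    obtain ⟨w, hw, hbw⟩ := List.mem_flatMap.mp hb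
    rw [List.eq_of_mem_replicate hbw]
    exact le_of_lt ((List.pairwise_cons.mp h).1 w hw)

-- the filter predicates of A and B agree
theorem filter_pred_eq (l : List Char) :
    l.filter (fun i => decide (i ∈ ['a','e','i','o','u'] ∨ i ∈ ['A','E','I','O','U']))
    = l.filter (fun ch => VocB_vowels.contains ch) := by
  refine List.filter_congr (fun x _ => ?_)
  simp only [VocB_vowels, List.contains_eq_mem, List.mem_cons, List.not_mem_nil, or_false,
    decide_eq_decide]
  tauto

-- ===== VERDICT (by name: the statement is the Claim_ definition above) =====
theorem Vocali_spec : Claim_equal_Vocali := by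
  unfold Claim_equal_Vocali Spec_Vocali
  intro a _
  -- A side: filter then selection sort
  simp only [Vocali]
  rw [PySem.List.foldl_append_ite_eq_filter (fun i => i ∈ ['a','e','i','o','u'] ∨ i ∈ ['A','E','I','O','U'])]
  simp only [List.nil_append]
  set fl := a.toList.filter (fun i => decide (i ∈ ['a','e','i','o','u'] ∨ i ∈ ['A','E','I','O','U'])) with hfl
  rw [show (PySem.List.pyRange 0 ((fl.length : Int) - 1) 1).foldl
        (fun l j => (PySem.List.pyRange (j + 1) (l.length : Int) 1).foldl (VocA_step j) l) fl
      = [] ++ selSort fl from by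
    rw [← List.nil_append fl]
    exact outer_aux fl.length fl [] 0 ((fl.length : Int) - 1) rfl (by simp) (by simp)]
  simp only [List.nil_append]
  -- B side: counting pass then bucket emission
  simp only [Vocali_alt]
  have hcfold := PySem.List.foldl_if_eq_foldl_filter (fun ch : Char => VocB_vowels.contains ch)
       (fun (d : PySem.Dict Char Int) ch => d.insert ch (d.getD ch 0 + 1)) a.toList PySem.Dict.empty
  rw [hcfold]
  have hemit := PySem.List.foldl_append_eq_flatMap
       (fun v => List.replicate (((a.toList.filter (fun ch : Char => VocB_vowels.contains ch)).foldl
          (fun (d : PySem.Dict Char Int) ch => d.insert ch (d.getD ch 0 + 1)) PySem.Dict.empty).getD v 0).toNat v)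
       VocB_vowels []
  rw [hemit]
  simp only [List.nil_append]
  have hcnt : ∀ v : Char,
      (((a.toList.filter (fun ch => VocB_vowels.contains ch)).foldl
          (fun (d : PySem.Dict Char Int) ch => d.insert ch (d.getD ch 0 + 1)) PySem.Dict.empty).getD v 0).toNat
      = (a.toList.filter (fun ch => VocB_vowels.contains ch)).count v := by
    intro v
    rw [PySem.Dict.getD_foldl_insert_add_one, PySem.Dict.getD_empty]
    simp
  have hflB : fl = a.toList.filter (fun ch => VocB_vowels.contains ch) := by
    rw [hfl]; exact filter_pred_eq a.toList
  -- both are sorted rearrangements of fl, hence equal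
  have hflat : (VocB_vowels.flatMap fun v => List.replicate
      (((a.toList.filter (fun ch => VocB_vowels.contains ch)).foldl
          (fun (d : PySem.Dict Char Int) ch => d.insert ch (d.getD ch 0 + 1)) PySem.Dict.empty).getD v 0).toNat v)
      = VocB_vowels.flatMap fun v => List.replicate (fl.count v) v := by
    refine flatMap_congr_mem _ _ _ (fun v _ => ?_)
    rw [hcnt v, hflB]
  rw [hflat]
  have hsub : ∀ x ∈ fl, x ∈ VocB_vowels := by
    intro x hx
    have := List.of_mem_filter (hflB ▸ hx)
    simpa using this
  have hperm : (selSort fl).Perm (VocB_vowels.flatMap fun v => List.replicate (fl.count v) v) :=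
    (selSort_perm fl).trans (flatMap_replicate_perm VocB_vowels (by decide) fl hsub).symm
  have heq : selSort fl = VocB_vowels.flatMap fun v => List.replicate (fl.count v) v :=
    hperm.eq_of_pairwise (fun a b _ _ h1 h2 => le_antisymm h1 h2)
      (selSort_sorted fl)
      (flatMap_replicate_sorted VocB_vowels (by decide) _)
  rw [heq]
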